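-- pv_equiv track=rewrite | github.com/johnynixons/Dashmanifestchecker | dash_checker.py | calculate_segments
-- ===== SOURCE A (Python) =====
-- def calculate_segments(segments):
--     current_time = 0
--     all_times = []
--
--     for segment in segments:
--         repeat = segment.get('r', 0) + 1
--         for _ in range(repeat):
--             all_times.append(current_time)
--             current_time += segment["d"]
--
--     return all_times
-- ===== SOURCE B (Python) =====
-- def calculate_segments(segments):
--     durations = []
--     for segment in segments:
--         repeat = segment.get('r', 0) + 1
--         if repeat > 0:
--             durations.extend([segment['d']] * repeat)
--     times = [0]
--     for d in durations:
--         times.append(times[-1] + d)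
--     return times[:-1]
-- ===== Notes on version B (the rewrite author's own statement) =====
-- stated objective: alternative
-- what changed: Splits A's single interleaved append/increment loop into two differently-shaped passes: an expansion pass that flattens each segment's duration repeated r+1 times into a flat durations list, then a prefix-sum scan producing the exclusive running totals.
import Mathlib
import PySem

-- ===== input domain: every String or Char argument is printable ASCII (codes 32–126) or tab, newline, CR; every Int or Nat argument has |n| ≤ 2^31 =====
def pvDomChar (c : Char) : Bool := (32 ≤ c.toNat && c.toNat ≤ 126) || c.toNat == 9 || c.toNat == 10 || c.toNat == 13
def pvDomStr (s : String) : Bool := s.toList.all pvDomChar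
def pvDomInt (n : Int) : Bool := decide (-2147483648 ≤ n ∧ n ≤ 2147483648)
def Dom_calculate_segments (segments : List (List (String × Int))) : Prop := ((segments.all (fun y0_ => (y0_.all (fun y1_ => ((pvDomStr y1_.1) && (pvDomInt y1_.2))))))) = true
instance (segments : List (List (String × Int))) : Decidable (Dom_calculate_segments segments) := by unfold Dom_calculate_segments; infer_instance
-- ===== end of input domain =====

-- B re-decomposes A: first expand durations into a flat list, then take exclusive prefix sums
-- (equivalence of the two RETURN values; neither version mutates its argument).

-- dict lookup helper shared by both ports: segment.get(k) (first match, per the association-list convention)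
def pvLookup (seg : List (String × Int)) (k : String) : Option Int :=
  (seg.find? (fun p => p.1 == k)).map Prod.snd

-- ===== PORT A =====
def calculate_segments (segments : List (List (String × Int))) : List Int :=
  (segments.foldl
    (fun (st : Int × List Int) segment =>
      let rep := (pvLookup segment "r").getD 0 + 1
      -- segment["d"]: under Pre_ the key is present whenever this loop body runs; getD 0 is the total stand-in
      (PySem.List.pyRange 0 rep 1).foldl
        (fun (st : Int × List Int) _ => (st.1 + (pvLookup segment "d").getD 0, st.2 ++ [st.1])) st)
    (0, [])).2

-- ===== PORT B =====
def calculate_segments_alt (segments : List (List (String × Int))) : List Int :=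
  let durations := segments.foldl
    (fun (acc : List Int) segment =>
      let rep := (pvLookup segment "r").getD 0 + 1
      if 0 < rep then acc ++ List.replicate rep.toNat ((pvLookup segment "d").getD 0) else acc)
    []
  (durations.foldl (fun (ts : List Int) d => ts ++ [ts.getLastD 0 + d]) [0]).dropLast

-- ===== PRECONDITION & SPEC =====
-- Pre_ excludes exactly the inputs on which both Pythons raise KeyError: a segment whose
-- body would run (r+1 > 0) but which has no "d" key.
def Pre_calculate_segments (segments : List (List (String × Int))) : Prop :=
  ∀ segment ∈ segments,
    0 < ((segment.find? (fun p => p.1 == "r")).map Prod.snd).getD 0 + 1 →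
    ((segment.find? (fun p => p.1 == "d")).map Prod.snd).isSome = true
instance (segments : List (List (String × Int))) : Decidable (Pre_calculate_segments segments) := by
  unfold Pre_calculate_segments; infer_instance
def pvWitness_calculate_segments : (List (List (String × Int))) := [[("d", 5), ("r", 2)], [("d", 3)]]

def Spec_calculate_segments (segments : List (List (String × Int))) (out : List Int) : Prop := out = calculate_segments_alt segments
instance (segments : List (List (String × Int))) (out : List Int) : Decidable (Spec_calculate_segments segments out) := by unfold Spec_calculate_segments; infer_instance

-- ===== CLAIM (what is proved, stated in full; the proofs are below) =====
def Claim_equal_calculate_segments : Prop := ∀ (segments : List (List (String × Int))), Dom_calculate_segments segments → Pre_calculate_segments segments → Spec_calculate_segments segments (calculate_segments segments)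

-- ===== LEMMAS AND PROOFS =====

-- exclusive prefix sums starting at t (proof-side characterisation of B's scan)
def pvPrefixes (t : Int) : List Int → List Int
  | [] => []
  | d :: ds => t :: pvPrefixes (t + d) ds

-- the flat durations list, as a flatMap (proof-side characterisation of B's first pass)
def pvExpand (segments : List (List (String × Int))) : List Int :=
  segments.flatMap (fun segment =>
    List.replicate ((pvLookup segment "r").getD 0 + 1).toNat ((pvLookup segment "d").getD 0))

theorem pvPrefixes_append (xs ys : List Int) : ∀ t : Int,
    pvPrefixes t (xs ++ ys) = pvPrefixes t xs ++ pvPrefixes (t + xs.sum) ys := by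
  induction xs with
  | nil => intro t; simp [pvPrefixes]
  | cons x xs ih =>
      intro t
      simp only [List.cons_append, pvPrefixes, ih, List.sum_cons]
      rw [add_assoc]

-- A's inner repeat-loop, over any index list of the right length
theorem pvInnerFold (dv : Int) : ∀ (l : List Int) (t : Int) (acc : List Int),
    l.foldl (fun (st : Int × List Int) _ => (st.1 + dv, st.2 ++ [st.1])) (t, acc)
      = (t + (List.replicate l.length dv).sum, acc ++ pvPrefixes t (List.replicate l.length dv)) := by
  intro l
  induction l with
  | nil => intro t acc; simp [pvPrefixes]
  | cons x l ih =>
      intro t acc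
      simp only [List.foldl_cons, ih, List.length_cons, List.replicate_succ, List.sum_cons,
        pvPrefixes, List.append_assoc, List.singleton_append]
      rw [add_assoc]

-- A's outer loop
theorem pvAFold : ∀ (segs : List (List (String × Int))) (t : Int) (acc : List Int),
    segs.foldl
      (fun (st : Int × List Int) segment =>
        let rep := (pvLookup segment "r").getD 0 + 1
        (PySem.List.pyRange 0 rep 1).foldl
          (fun (st : Int × List Int) _ => (st.1 + (pvLookup segment "d").getD 0, st.2 ++ [st.1])) st)
      (t, acc)
    = (t + (pvExpand segs).sum, acc ++ pvPrefixes t (pvExpand segs)) := by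
  intro segs
  induction segs with
  | nil => intro t acc; simp [pvExpand, pvPrefixes]
  | cons seg segs ih =>
      intro t acc
      have hlen : (PySem.List.pyRange 0 ((pvLookup seg "r").getD 0 + 1) 1).length
          = ((pvLookup seg "r").getD 0 + 1).toNat := by
        rw [PySem.List.length_pyRange_one]; simp
      simp only [List.foldl_cons]
      rw [pvInnerFold, hlen, ih]
      simp only [pvExpand, List.flatMap_cons, List.sum_append, pvPrefixes_append,
        List.append_assoc]
      rw [add_assoc]

-- B's expansion loop equals the flatMap
theorem pvBExpand : ∀ (segs : List (List (String × Int))) (acc : List Int),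
    segs.foldl
      (fun (acc : List Int) segment =>
        let rep := (pvLookup segment "r").getD 0 + 1
        if 0 < rep then acc ++ List.replicate rep.toNat ((pvLookup segment "d").getD 0) else acc)
      acc
    = acc ++ pvExpand segs := by
  intro segs
  induction segs with
  | nil => intro acc; simp [pvExpand]
  | cons seg segs ih =>
      intro acc
      simp only [List.foldl_cons, pvExpand, List.flatMap_cons]
      by_cases h : 0 < (pvLookup seg "r").getD 0 + 1
      · simp only [if_pos h, ih, pvExpand, List.append_assoc]
      · have hz : ((pvLookup seg "r").getD 0 + 1).toNat = 0 := by omega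
        simp only [if_neg h, ih, pvExpand, hz, List.replicate_zero, List.nil_append]

theorem pvDropLast_getLastD (l : List Int) (hl : l ≠ []) :
    l.dropLast ++ [l.getLastD 0] = l := by
  induction l using List.reverseRecOn with
  | nil => exact absurd rfl hl
  | append_singleton xs x _ => simp

-- B's scan loop
theorem pvBScan : ∀ (ds l : List Int), l ≠ [] →
    ds.foldl (fun (ts : List Int) d => ts ++ [ts.getLastD 0 + d]) l
      = l.dropLast ++ pvPrefixes (l.getLastD 0) ds ++ [l.getLastD 0 + ds.sum] := by
  intro ds
  induction ds with
  | nil =>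
      intro l hl
      simp only [List.foldl_nil, pvPrefixes, List.sum_nil, add_zero, List.append_nil]
      exact (pvDropLast_getLastD l hl).symm
  | cons d ds ih =>
      intro l hl
      simp only [List.foldl_cons]
      rw [ih (l ++ [l.getLastD 0 + d]) (by simp)]
      have h1 : (l ++ [l.getLastD 0 + d]).dropLast = l := by simp
      have h2 : (l ++ [l.getLastD 0 + d]).getLastD 0 = l.getLastD 0 + d := by
        simp
      rw [h1, h2]
      conv_lhs => rw [← pvDropLast_getLastD l hl]
      simp only [pvPrefixes, List.sum_cons, List.append_assoc, List.singleton_append,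
        List.getLastD_concat]
      rw [add_assoc]

-- ===== VERDICT (by name: the statement is the Claim_ definition above) =====
theorem calculate_segments_spec : Claim_equal_calculate_segments := by
  intro segments _ _
  unfold Spec_calculate_segments calculate_segments calculate_segments_alt
  simp only [pvAFold, pvBExpand, List.nil_append]
  rw [pvBScan (pvExpand segments) [0] (by simp)]
  simp
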